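-- pv_equiv track=rewrite | github.com/yunachooi/algo-practice-hub | Programmers/Lv 0/캐릭터의 좌표.py | solution
-- ===== SOURCE A (Python) =====
-- def solution(keyinput, board):
--     lst = {'up' : (0, 1) , 'down' : (0, -1), 'left' : (-1, 0) , 'right' : (1, 0)}
--     x, y = 0, 0
--
--     for i in keyinput:
--         dx = x + lst[i][0]
--         dy = y + lst[i][1]
--
--         if abs(dx) > board[0] // 2 or abs(dy) > board[1] // 2:
--             continue
--         else:
--             x = dx
--             y = dy
--
--     answer = [x, y]
--     return answer
-- ===== SOURCE B (Python) =====
-- def solution(keyinput, board):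
--     # Two independent per-axis passes: x depends only on the horizontal deltas and
--     # board[0]//2, y only on the vertical deltas and board[1]//2.
--     dx_of = {'up': 0, 'down': 0, 'left': -1, 'right': 1}
--     dy_of = {'up': 1, 'down': -1, 'left': 0, 'right': 0}
--     x = 0
--     for k in keyinput:
--         nx = x + dx_of[k]
--         if abs(nx) <= board[0] // 2:
--             x = nx
--     y = 0
--     for k in keyinput:
--         ny = y + dy_of[k]
--         if abs(ny) <= board[1] // 2:
--             y = ny
--     return [x, y]
-- ===== Notes on version B (the rewrite author's own statement) =====
-- stated objective: alternative
-- what changed: A's single interleaved pass maintaining (x, y) together is replaced by two independent per-axis passes: one loop over keyinput updates only x from left/right with the board[0]//2 clamp, a second updates only y from up/down with the board[1]//2 clamp.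
-- outside the precondition, e.g. on solution(['up'], [-1, 10]): A returns [0, 0], B returns [0, 1]; on solution(['left'], [0]): A returns [0, 0], B raises IndexError
import Mathlib
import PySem

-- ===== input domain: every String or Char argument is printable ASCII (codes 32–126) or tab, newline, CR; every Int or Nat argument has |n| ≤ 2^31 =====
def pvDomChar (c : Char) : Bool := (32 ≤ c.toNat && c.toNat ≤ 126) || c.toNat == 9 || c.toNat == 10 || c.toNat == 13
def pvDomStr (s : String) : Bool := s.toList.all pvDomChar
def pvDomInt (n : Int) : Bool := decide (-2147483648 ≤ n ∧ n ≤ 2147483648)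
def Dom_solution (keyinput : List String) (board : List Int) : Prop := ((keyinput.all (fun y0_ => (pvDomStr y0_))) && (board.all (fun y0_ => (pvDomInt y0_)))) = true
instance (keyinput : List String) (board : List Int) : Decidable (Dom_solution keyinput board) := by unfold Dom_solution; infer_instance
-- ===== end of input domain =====

-- B replaces A's single interleaved (x,y) pass by two independent per-axis passes
-- (objective: alternative decomposition, same cost).

-- ===== PORT A =====
-- A's loop body; the move dict lookup is PySem.Dict.getD (KeyError inputs are outside Pre_).
def pvStepA (board : List Int) (s : Int × Int) (i : String) : Int × Int :=
  let d : Int × Int :=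
    PySem.Dict.getD (PySem.Dict.ofList
      [("up", ((0:Int), (1:Int))), ("down", (0, -1)), ("left", (-1, 0)), ("right", (1, 0))]) i (0, 0)
  let dx := s.1 + d.1
  let dy := s.2 + d.2
  if |dx| > PySem.Int.floordiv (PySem.List.pyGetD board 0 0) 2 ∨
     |dy| > PySem.Int.floordiv (PySem.List.pyGetD board 1 0) 2 then s else (dx, dy)

def solution (keyinput : List String) (board : List Int) : List Int :=
  let st := keyinput.foldl (pvStepA board) (0, 0)
  [st.1, st.2]

-- ===== PORT B =====
def pvStepH (board : List Int) (x : Int) (k : String) : Int :=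
  let nx := x + PySem.Dict.getD (PySem.Dict.ofList
    [("up", (0:Int)), ("down", 0), ("left", -1), ("right", 1)]) k 0
  if |nx| ≤ PySem.Int.floordiv (PySem.List.pyGetD board 0 0) 2 then nx else x

def pvStepV (board : List Int) (y : Int) (k : String) : Int :=
  let ny := y + PySem.Dict.getD (PySem.Dict.ofList
    [("up", (1:Int)), ("down", -1), ("left", 0), ("right", 0)]) k 0
  if |ny| ≤ PySem.Int.floordiv (PySem.List.pyGetD board 1 0) 2 then ny else y

def solution_alt (keyinput : List String) (board : List Int) : List Int :=
  let x := keyinput.foldl (pvStepH board) 0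
  let y := keyinput.foldl (pvStepV board) 0
  [x, y]

-- ===== PRECONDITION & SPEC =====
-- Pre_ excludes inputs on which A raises (a key outside the move dict → KeyError; a nonempty
-- keyinput with a board shorter than 2 → possible IndexError) and, restricting to the natural
-- domain of the task, nonempty keyinput with a negative board dimension (board is a
-- [width, height] pair, so dimensions are nonnegative; on negative dimensions A's clamp on one
-- axis accidentally blocks moves on the other axis).
def Pre_solution (keyinput : List String) (board : List Int) : Prop :=
  (∀ k ∈ keyinput, k = "up" ∨ k = "down" ∨ k = "left" ∨ k = "right") ∧
  (keyinput = [] ∨ (2 ≤ board.length ∧ 0 ≤ board.getD 0 0 ∧ 0 ≤ board.getD 1 0))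
instance (keyinput : List String) (board : List Int) : Decidable (Pre_solution keyinput board) := by
  unfold Pre_solution; infer_instance

def pvWitness_solution : List String × List Int := (["up", "up", "left", "down", "right"], [5, 3])

def Spec_solution (keyinput : List String) (board : List Int) (out : List Int) : Prop := out = solution_alt keyinput board
instance (keyinput : List String) (board : List Int) (out : List Int) : Decidable (Spec_solution keyinput board out) := by unfold Spec_solution; infer_instance

-- ===== CLAIM (what is proved, stated in full; the proofs are below) =====
def Claim_equal_solution : Prop := ∀ (keyinput : List String) (board : List Int), Dom_solution keyinput board → Pre_solution keyinput board → Spec_solution keyinput board (solution keyinput board)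

-- ===== LEMMAS AND PROOFS =====

theorem pv_getD_up : PySem.Dict.getD (PySem.Dict.ofList
    [("up", ((0:Int), (1:Int))), ("down", (0, -1)), ("left", (-1, 0)), ("right", (1, 0))]) "up" (0, 0) = (0, 1) := by decide
theorem pv_getD_down : PySem.Dict.getD (PySem.Dict.ofList
    [("up", ((0:Int), (1:Int))), ("down", (0, -1)), ("left", (-1, 0)), ("right", (1, 0))]) "down" (0, 0) = (0, -1) := by decide
theorem pv_getD_left : PySem.Dict.getD (PySem.Dict.ofList
    [("up", ((0:Int), (1:Int))), ("down", (0, -1)), ("left", (-1, 0)), ("right", (1, 0))]) "left" (0, 0) = (-1, 0) := by decide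
theorem pv_getD_right : PySem.Dict.getD (PySem.Dict.ofList
    [("up", ((0:Int), (1:Int))), ("down", (0, -1)), ("left", (-1, 0)), ("right", (1, 0))]) "right" (0, 0) = (1, 0) := by decide

theorem pv_stepA_up (board : List Int) (x y : Int) : pvStepA board (x, y) "up" =
    if |x| > PySem.Int.floordiv (PySem.List.pyGetD board 0 0) 2 ∨
       |y + 1| > PySem.Int.floordiv (PySem.List.pyGetD board 1 0) 2 then (x, y) else (x, y + 1) := by
  simp [pvStepA, pv_getD_up]
theorem pv_stepA_down (board : List Int) (x y : Int) : pvStepA board (x, y) "down" =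
    if |x| > PySem.Int.floordiv (PySem.List.pyGetD board 0 0) 2 ∨
       |y - 1| > PySem.Int.floordiv (PySem.List.pyGetD board 1 0) 2 then (x, y) else (x, y - 1) := by
  simp [pvStepA, pv_getD_down]; ring_nf
theorem pv_stepA_left (board : List Int) (x y : Int) : pvStepA board (x, y) "left" =
    if |x - 1| > PySem.Int.floordiv (PySem.List.pyGetD board 0 0) 2 ∨
       |y| > PySem.Int.floordiv (PySem.List.pyGetD board 1 0) 2 then (x, y) else (x - 1, y) := by
  simp [pvStepA, pv_getD_left]; ring_nf
theorem pv_stepA_right (board : List Int) (x y : Int) : pvStepA board (x, y) "right" =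
    if |x + 1| > PySem.Int.floordiv (PySem.List.pyGetD board 0 0) 2 ∨
       |y| > PySem.Int.floordiv (PySem.List.pyGetD board 1 0) 2 then (x, y) else (x + 1, y) := by
  simp [pvStepA, pv_getD_right]

theorem pv_getDH_up : PySem.Dict.getD (PySem.Dict.ofList
    [("up", (0:Int)), ("down", 0), ("left", -1), ("right", 1)]) "up" 0 = 0 := by decide
theorem pv_getDH_down : PySem.Dict.getD (PySem.Dict.ofList
    [("up", (0:Int)), ("down", 0), ("left", -1), ("right", 1)]) "down" 0 = 0 := by decide
theorem pv_getDH_left : PySem.Dict.getD (PySem.Dict.ofList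
    [("up", (0:Int)), ("down", 0), ("left", -1), ("right", 1)]) "left" 0 = -1 := by decide
theorem pv_getDH_right : PySem.Dict.getD (PySem.Dict.ofList
    [("up", (0:Int)), ("down", 0), ("left", -1), ("right", 1)]) "right" 0 = 1 := by decide
theorem pv_getDV_up : PySem.Dict.getD (PySem.Dict.ofList
    [("up", (1:Int)), ("down", -1), ("left", 0), ("right", 0)]) "up" 0 = 1 := by decide
theorem pv_getDV_down : PySem.Dict.getD (PySem.Dict.ofList
    [("up", (1:Int)), ("down", -1), ("left", 0), ("right", 0)]) "down" 0 = -1 := by decide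
theorem pv_getDV_left : PySem.Dict.getD (PySem.Dict.ofList
    [("up", (1:Int)), ("down", -1), ("left", 0), ("right", 0)]) "left" 0 = 0 := by decide
theorem pv_getDV_right : PySem.Dict.getD (PySem.Dict.ofList
    [("up", (1:Int)), ("down", -1), ("left", 0), ("right", 0)]) "right" 0 = 0 := by decide

theorem pv_stepH_up (board : List Int) (x : Int) : pvStepH board x "up" = x := by
  simp [pvStepH, pv_getDH_up]
theorem pv_stepH_down (board : List Int) (x : Int) : pvStepH board x "down" = x := by
  simp [pvStepH, pv_getDH_down]
theorem pv_stepH_left (board : List Int) (x : Int) : pvStepH board x "left" =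
    if |x - 1| ≤ PySem.Int.floordiv (PySem.List.pyGetD board 0 0) 2 then x - 1 else x := by
  simp [pvStepH, pv_getDH_left]; ring_nf
theorem pv_stepH_right (board : List Int) (x : Int) : pvStepH board x "right" =
    if |x + 1| ≤ PySem.Int.floordiv (PySem.List.pyGetD board 0 0) 2 then x + 1 else x := by
  simp [pvStepH, pv_getDH_right]
theorem pv_stepV_left (board : List Int) (y : Int) : pvStepV board y "left" = y := by
  simp [pvStepV, pv_getDV_left]
theorem pv_stepV_right (board : List Int) (y : Int) : pvStepV board y "right" = y := by
  simp [pvStepV, pv_getDV_right]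
theorem pv_stepV_up (board : List Int) (y : Int) : pvStepV board y "up" =
    if |y + 1| ≤ PySem.Int.floordiv (PySem.List.pyGetD board 1 0) 2 then y + 1 else y := by
  simp [pvStepV, pv_getDV_up]
theorem pv_stepV_down (board : List Int) (y : Int) : pvStepV board y "down" =
    if |y - 1| ≤ PySem.Int.floordiv (PySem.List.pyGetD board 1 0) 2 then y - 1 else y := by
  simp [pvStepV, pv_getDV_down]; ring_nf

theorem pv_loop_eq (board : List Int) :
    ∀ (ks : List String) (x y : Int),
      (∀ k ∈ ks, k = "up" ∨ k = "down" ∨ k = "left" ∨ k = "right") →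
      |x| ≤ PySem.Int.floordiv (PySem.List.pyGetD board 0 0) 2 →
      |y| ≤ PySem.Int.floordiv (PySem.List.pyGetD board 1 0) 2 →
      ks.foldl (pvStepA board) (x, y) = (ks.foldl (pvStepH board) x, ks.foldl (pvStepV board) y) := by
  intro ks
  induction ks with
  | nil => intro x y _ _ _; rfl
  | cons k ks ih =>
    intro x y hk hx hy
    obtain ⟨hkhd, hktl⟩ := List.forall_mem_cons.mp hk
    rcases hkhd with h | h | h | h <;> subst h <;> simp only [List.foldl_cons]
    · rw [pv_stepA_up, pv_stepH_up, pv_stepV_up]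
      by_cases hc : |y + 1| ≤ PySem.Int.floordiv (PySem.List.pyGetD board 1 0) 2
      · rw [if_neg (by omega), if_pos hc]; exact ih x (y + 1) hktl hx hc
      · rw [if_pos (by omega), if_neg hc]; exact ih x y hktl hx hy
    · rw [pv_stepA_down, pv_stepH_down, pv_stepV_down]
      by_cases hc : |y - 1| ≤ PySem.Int.floordiv (PySem.List.pyGetD board 1 0) 2
      · rw [if_neg (by omega), if_pos hc]; exact ih x (y - 1) hktl hx hc
      · rw [if_pos (by omega), if_neg hc]; exact ih x y hktl hx hy
    · rw [pv_stepA_left, pv_stepH_left, pv_stepV_left]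
      by_cases hc : |x - 1| ≤ PySem.Int.floordiv (PySem.List.pyGetD board 0 0) 2
      · rw [if_neg (by omega), if_pos hc]; exact ih (x - 1) y hktl hc hy
      · rw [if_pos (by omega), if_neg hc]; exact ih x y hktl hx hy
    · rw [pv_stepA_right, pv_stepH_right, pv_stepV_right]
      by_cases hc : |x + 1| ≤ PySem.Int.floordiv (PySem.List.pyGetD board 0 0) 2
      · rw [if_neg (by omega), if_pos hc]; exact ih (x + 1) y hktl hc hy
      · rw [if_pos (by omega), if_neg hc]; exact ih x y hktl hx hy

-- ===== VERDICT (by name: the statement is the Claim_ definition above) =====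
theorem solution_spec : Claim_equal_solution := by
  intro keyinput board _ hpre
  obtain ⟨hkeys, hboard⟩ := hpre
  unfold Spec_solution solution solution_alt
  rcases hboard with h | ⟨hlen, h0, h1⟩
  · subst h; rfl
  · have e0 : PySem.List.pyGetD board 0 0 = board.getD 0 0 := by
      simpa using PySem.List.pyGetD_natCast board (0:Nat) 0
    have e1 : PySem.List.pyGetD board 1 0 = board.getD 1 0 := by
      simpa using PySem.List.pyGetD_natCast board (1:Nat) 0
    have hbx : 0 ≤ PySem.Int.floordiv (PySem.List.pyGetD board 0 0) 2 := by
      rw [PySem.Int.floordiv_eq_ediv_of_pos (by omega), e0]; omega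
    have hby : 0 ≤ PySem.Int.floordiv (PySem.List.pyGetD board 1 0) 2 := by
      rw [PySem.Int.floordiv_eq_ediv_of_pos (by omega), e1]; omega
    rw [pv_loop_eq board keyinput 0 0 hkeys (by simpa using hbx) (by simpa using hby)]
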